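-- pv_equiv track=rewrite | github.com/hoNATHAN/Q-Bet | q-bet-scraper/utils/chat.py | split_tournaments_by_group
-- ===== SOURCE A (Python) =====
-- from collections import defaultdict
--
-- def split_tournaments_by_group(tournament_json, group_definitions):
--     grouped_output = defaultdict(dict)
--     for tournament_name, tournament_data in tournament_json.items():
--         for group_name, tournaments in group_definitions.items():
--             if tournament_name in tournaments:
--                 grouped_output[group_name][tournament_name] = tournament_data
--                 break
--     return grouped_output
-- ===== SOURCE B (Python) =====
-- def split_tournaments_by_group(tournament_json, group_definitions):
--     # Build an inverted index tournament-name -> first group containing it,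
--     # so the per-tournament inner scan over all groups disappears.
--     index = {}
--     for group_name, tournaments in group_definitions.items():
--         for name in tournaments:
--             index.setdefault(name, group_name)
--     grouped_output = {}
--     for tournament_name, tournament_data in tournament_json.items():
--         group_name = index.get(tournament_name)
--         if group_name is not None:
--             bucket = grouped_output.get(group_name, {})
--             bucket[tournament_name] = tournament_data
--             grouped_output[group_name] = bucket
--     return grouped_output
-- ===== Notes on version B (the rewrite author's own statement) =====
-- stated objective: faster
-- what changed: B builds an inverted index (tournament name -> first group containing it) in one pass over the definitions, then assigns each tournament by a single dict lookup, eliminating A's per-tournament scan over every group's list.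
import Mathlib
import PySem

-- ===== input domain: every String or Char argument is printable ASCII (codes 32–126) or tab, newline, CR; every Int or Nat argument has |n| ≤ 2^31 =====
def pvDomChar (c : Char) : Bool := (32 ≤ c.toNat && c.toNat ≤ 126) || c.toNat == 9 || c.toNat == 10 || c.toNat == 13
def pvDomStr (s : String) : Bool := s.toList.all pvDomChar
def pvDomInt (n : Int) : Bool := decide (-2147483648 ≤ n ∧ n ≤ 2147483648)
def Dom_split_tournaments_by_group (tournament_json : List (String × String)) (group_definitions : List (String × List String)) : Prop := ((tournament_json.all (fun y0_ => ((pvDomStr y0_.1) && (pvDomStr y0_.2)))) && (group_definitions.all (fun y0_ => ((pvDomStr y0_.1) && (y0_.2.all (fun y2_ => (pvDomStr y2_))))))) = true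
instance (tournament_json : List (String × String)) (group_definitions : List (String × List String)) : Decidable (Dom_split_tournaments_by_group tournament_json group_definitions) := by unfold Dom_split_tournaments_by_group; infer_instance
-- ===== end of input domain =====

-- B replaces A's per-tournament scan over every group's member list by an inverted
-- index (tournament name -> first group containing it) built once; objective: faster.

-- ===== PORT A =====
-- the inner 'for group_name, tournaments in group_definitions.items(): if tournament_name in tournaments: …; break'
def pvAInner (tn td : String) (d : PySem.Dict String (PySem.Dict String String)) :
    List (String × List String) → PySem.Dict String (PySem.Dict String String)
  | [] => d
  | (gn, ts) :: rest =>
    if ts.contains tn then d.modify gn PySem.Dict.empty (fun m => m.insert tn td)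
    else pvAInner tn td d rest

def split_tournaments_by_group (tournament_json : List (String × String)) (group_definitions : List (String × List String)) : List (String × List (String × String)) :=
  let grouped_output :=
    tournament_json.foldl (fun d p => pvAInner p.1 p.2 d group_definitions) PySem.Dict.empty
  grouped_output.items.map (fun p => (p.1, p.2.items))

-- ===== PORT B =====
-- index.setdefault(name, group_name) over every group's member list
def pvBIndex (group_definitions : List (String × List String)) : PySem.Dict String String :=
  group_definitions.foldl
    (fun d g => g.2.foldl (fun d name => d.setdefault name g.1) d) PySem.Dict.empty

def split_tournaments_by_group_alt (tournament_json : List (String × String)) (group_definitions : List (String × List String)) : List (String × List (String × String)) :=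
  let index := pvBIndex group_definitions
  let grouped_output :=
    tournament_json.foldl
      (fun d p =>
        match index.get? p.1 with
        | none => d
        | some gn => d.insert gn ((d.getD gn PySem.Dict.empty).insert p.1 p.2))
      PySem.Dict.empty
  grouped_output.items.map (fun p => (p.1, p.2.items))

-- ===== PRECONDITION & SPEC =====
def Spec_split_tournaments_by_group (tournament_json : List (String × String)) (group_definitions : List (String × List String)) (out : List (String × List (String × String))) : Prop := out = split_tournaments_by_group_alt tournament_json group_definitions
instance (tournament_json : List (String × String)) (group_definitions : List (String × List String)) (out : List (String × List (String × String))) : Decidable (Spec_split_tournaments_by_group tournament_json group_definitions out) := by unfold Spec_split_tournaments_by_group; infer_instance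

-- ===== CLAIM (what is proved, stated in full; the proofs are below) =====
def Claim_equal_split_tournaments_by_group : Prop := ∀ (tournament_json : List (String × String)) (group_definitions : List (String × List String)), Dom_split_tournaments_by_group tournament_json group_definitions → Spec_split_tournaments_by_group tournament_json group_definitions (split_tournaments_by_group tournament_json group_definitions)

-- ===== LEMMAS AND PROOFS =====

-- first group (in definition order) whose member list contains tn
def pvFirstGroup (tn : String) : List (String × List String) → Option String
  | [] => none
  | (gn, ts) :: rest => if ts.contains tn then some gn else pvFirstGroup tn rest

theorem pv_setdefault_fold (tn gn : String) (ts : List String)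
    (d : PySem.Dict String String) :
    (ts.foldl (fun d name => d.setdefault name gn) d).get? tn =
      (d.get? tn).or (if tn ∈ ts then some gn else none) := by
  induction ts generalizing d with
  | nil => simp
  | cons x rest ih =>
    rw [List.foldl_cons]
    by_cases hc : d.contains x = true
    · rw [show d.setdefault x gn = d from by simp [PySem.Dict.setdefault, hc], ih]
      by_cases htn : tn = x
      · subst htn
        have hs : (d.get? tn).isSome := by
          rw [← PySem.Dict.contains_eq_isSome_get?]; exact hc
        obtain ⟨v, h⟩ := Option.isSome_iff_exists.mp hs
        simp [h]
      · simp [List.mem_cons, htn]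
    · simp only [Bool.not_eq_true] at hc
      rw [show d.setdefault x gn = d.insert x gn from by
            simp [PySem.Dict.setdefault, PySem.Dict.insert, hc],
          ih, PySem.Dict.get?_insert]
      by_cases htn : tn = x
      · subst htn
        have h : d.get? tn = none := by
          rw [PySem.Dict.get?_eq_none_iff_contains]; exact hc
        simp [h]
      · simp [htn, List.mem_cons]

theorem pv_index_get (tn : String) (gds : List (String × List String)) :
    (pvBIndex gds).get? tn = pvFirstGroup tn gds := by
  suffices h : ∀ (d : PySem.Dict String String),
      (gds.foldl (fun d g => g.2.foldl (fun d name => d.setdefault name g.1) d) d).get? tn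
        = (d.get? tn).or (pvFirstGroup tn gds) by
    simpa [pvBIndex, PySem.Dict.get?_empty] using h PySem.Dict.empty
  induction gds with
  | nil => intro d; simp [pvFirstGroup]
  | cons g rest ih =>
    intro d
    simp only [List.foldl_cons, ih, pv_setdefault_fold, pvFirstGroup, Option.or_assoc]
    by_cases hm : tn ∈ g.2
    · simp [hm]
    · simp [hm]

theorem pv_inner_eq (tn td : String) (gds : List (String × List String))
    (d : PySem.Dict String (PySem.Dict String String)) :
    pvAInner tn td d gds =
      (match pvFirstGroup tn gds with
       | none => d
       | some gn => d.modify gn PySem.Dict.empty (fun m => m.insert tn td)) := by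
  induction gds with
  | nil => simp [pvAInner, pvFirstGroup]
  | cons g rest ih =>
    obtain ⟨gn, ts⟩ := g
    by_cases hm : tn ∈ ts
    · simp [pvAInner, pvFirstGroup, hm]
    · simp [pvAInner, pvFirstGroup, hm, ih]

theorem pv_modify_eq_insert (gn tn td : String)
    (d : PySem.Dict String (PySem.Dict String String)) :
    d.modify gn PySem.Dict.empty (fun m => m.insert tn td) =
      d.insert gn ((d.getD gn PySem.Dict.empty).insert tn td) := by
  simp [PySem.Dict.modify, PySem.Dict.getD_eq_get?_getD]

theorem pv_fold_eq (tj : List (String × String)) (gds : List (String × List String)) :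
    tj.foldl (fun d p => pvAInner p.1 p.2 d gds) PySem.Dict.empty =
      tj.foldl
        (fun d p =>
          match (pvBIndex gds).get? p.1 with
          | none => d
          | some gn => d.insert gn ((d.getD gn PySem.Dict.empty).insert p.1 p.2))
        PySem.Dict.empty := by
  apply PySem.List.foldl_congr_mem
  intro acc p _
  rw [pv_inner_eq, pv_index_get]
  cases pvFirstGroup p.1 gds with
  | none => rfl
  | some gn => simp [pv_modify_eq_insert]

-- ===== VERDICT (by name: the statement is the Claim_ definition above) =====
theorem split_tournaments_by_group_spec : Claim_equal_split_tournaments_by_group := by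
  intro tj gds _
  unfold Spec_split_tournaments_by_group
  simp only [split_tournaments_by_group, split_tournaments_by_group_alt, pv_fold_eq]
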